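-- pv_equiv track=rewrite | github.com/BLACKUM/rtca-bot-hypixel | services/profile_parser.py | get_minion_slots
-- ===== SOURCE A (Python) =====
-- def get_minion_slots(unique: int) -> int:
--     thresholds = [
--         5, 15, 25, 35, 45, 55, 65, 75, 85, 95,
--         125, 160, 200, 250, 310, 390, 480, 590, 720, 880
--     ]
--     slots = 5
--     for t in thresholds:
--         if unique >= t:
--             slots += 1
--         else:
--             break
--     return slots
-- ===== SOURCE B (Python) =====
-- import bisect
--
-- _THRESHOLDS = [
--     5, 15, 25, 35, 45, 55, 65, 75, 85, 95,
--     125, 160, 200, 250, 310, 390, 480, 590, 720, 880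
-- ]
--
-- def get_minion_slots(unique: int) -> int:
--     return 5 + bisect.bisect_right(_THRESHOLDS, unique)
-- ===== Notes on version B (the rewrite author's own statement) =====
-- stated objective: idiomatic
-- what changed: Replaces the linear scan-with-break over the threshold table by a binary search (bisect_right) over the same sorted table, adding the insertion point to the base slot count.
import Mathlib
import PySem

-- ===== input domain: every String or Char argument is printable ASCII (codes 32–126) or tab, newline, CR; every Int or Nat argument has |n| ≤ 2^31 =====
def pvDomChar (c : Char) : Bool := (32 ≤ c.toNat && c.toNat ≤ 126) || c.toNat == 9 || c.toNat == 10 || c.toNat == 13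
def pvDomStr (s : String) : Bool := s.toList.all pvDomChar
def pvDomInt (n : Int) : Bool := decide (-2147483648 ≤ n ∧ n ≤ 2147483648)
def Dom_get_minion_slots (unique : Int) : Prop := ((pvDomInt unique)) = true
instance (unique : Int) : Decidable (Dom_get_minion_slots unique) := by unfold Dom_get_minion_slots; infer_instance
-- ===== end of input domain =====

-- B replaces A's linear scan-with-break over the sorted threshold table by a
-- binary search (bisect_right); idiomatic, same results.
-- ===== PORT A =====
def pvThresholds : List Int :=
  [5, 15, 25, 35, 45, 55, 65, 75, 85, 95,
   125, 160, 200, 250, 310, 390, 480, 590, 720, 880]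

-- A's for-loop with break: stop at the first threshold above `unique`.
def pvLoopA (unique : Int) : List Int → Int → Int
  | [], slots => slots
  | t :: ts, slots => if unique ≥ t then pvLoopA unique ts (slots + 1) else slots

def get_minion_slots (unique : Int) : Int :=
  pvLoopA unique pvThresholds 5

-- ===== PORT B =====
-- bisect.bisect_right(a, x, lo=0, hi=len(a)) as in CPython, exact on in-range indices.
def pvBisectRight (xs : List Int) (x : Int) (lo hi : Nat) : Nat :=
  if _h : lo < hi then
    let mid := (lo + hi) / 2
    if x < xs.getD mid 0 then pvBisectRight xs x lo mid
    else pvBisectRight xs x (mid + 1) hi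
  else lo
termination_by hi - lo

def get_minion_slots_alt (unique : Int) : Int :=
  5 + (pvBisectRight pvThresholds unique 0 pvThresholds.length : Int)

-- ===== PRECONDITION & SPEC =====
def Spec_get_minion_slots (unique : Int) (out : Int) : Prop := out = get_minion_slots_alt unique
instance (unique : Int) (out : Int) : Decidable (Spec_get_minion_slots unique out) := by unfold Spec_get_minion_slots; infer_instance

-- ===== CLAIM (what is proved, stated in full; the proofs are below) =====
def Claim_equal_get_minion_slots : Prop := ∀ (unique : Int), Dom_get_minion_slots unique → Spec_get_minion_slots unique (get_minion_slots unique)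

-- ===== LEMMAS AND PROOFS =====

-- number of thresholds strictly below-or-equal to u, as a nested conditional
def pvStep (u : Int) : Int :=
  if u < 5 then 0 else if u < 15 then 1 else if u < 25 then 2 else if u < 35 then 3
  else if u < 45 then 4 else if u < 55 then 5 else if u < 65 then 6 else if u < 75 then 7
  else if u < 85 then 8 else if u < 95 then 9 else if u < 125 then 10 else if u < 160 then 11
  else if u < 200 then 12 else if u < 250 then 13 else if u < 310 then 14 else if u < 390 then 15
  else if u < 480 then 16 else if u < 590 then 17 else if u < 720 then 18 else if u < 880 then 19
  else 20

lemma pvStep_eq_0 (u : Int) (h0 : u < 5) : pvStep u = 0 := by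
  unfold pvStep; rw [if_pos h0]

lemma pvStep_eq_1 (u : Int) (h0 : ¬ u < 5) (hk : u < 15) : pvStep u = 1 := by
  unfold pvStep; rw [if_neg h0, if_pos hk]

lemma pvStep_eq_2 (u : Int) (h0 : ¬ u < 5) (h1 : ¬ u < 15) (hk : u < 25) : pvStep u = 2 := by
  unfold pvStep; rw [if_neg h0, if_neg h1, if_pos hk]

lemma pvStep_eq_3 (u : Int) (h0 : ¬ u < 5) (h1 : ¬ u < 15) (h2 : ¬ u < 25) (hk : u < 35) : pvStep u = 3 := by
  unfold pvStep; rw [if_neg h0, if_neg h1, if_neg h2, if_pos hk]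

lemma pvStep_eq_4 (u : Int) (h0 : ¬ u < 5) (h1 : ¬ u < 15) (h2 : ¬ u < 25) (h3 : ¬ u < 35) (hk : u < 45) : pvStep u = 4 := by
  unfold pvStep; rw [if_neg h0, if_neg h1, if_neg h2, if_neg h3, if_pos hk]

lemma pvStep_eq_5 (u : Int) (h0 : ¬ u < 5) (h1 : ¬ u < 15) (h2 : ¬ u < 25) (h3 : ¬ u < 35) (h4 : ¬ u < 45) (hk : u < 55) : pvStep u = 5 := by
  unfold pvStep; rw [if_neg h0, if_neg h1, if_neg h2, if_neg h3, if_neg h4, if_pos hk]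

lemma pvStep_eq_6 (u : Int) (h0 : ¬ u < 5) (h1 : ¬ u < 15) (h2 : ¬ u < 25) (h3 : ¬ u < 35) (h4 : ¬ u < 45) (h5 : ¬ u < 55) (hk : u < 65) : pvStep u = 6 := by
  unfold pvStep; rw [if_neg h0, if_neg h1, if_neg h2, if_neg h3, if_neg h4, if_neg h5, if_pos hk]

lemma pvStep_eq_7 (u : Int) (h0 : ¬ u < 5) (h1 : ¬ u < 15) (h2 : ¬ u < 25) (h3 : ¬ u < 35) (h4 : ¬ u < 45) (h5 : ¬ u < 55) (h6 : ¬ u < 65) (hk : u < 75) : pvStep u = 7 := by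
  unfold pvStep; rw [if_neg h0, if_neg h1, if_neg h2, if_neg h3, if_neg h4, if_neg h5, if_neg h6, if_pos hk]

lemma pvStep_eq_8 (u : Int) (h0 : ¬ u < 5) (h1 : ¬ u < 15) (h2 : ¬ u < 25) (h3 : ¬ u < 35) (h4 : ¬ u < 45) (h5 : ¬ u < 55) (h6 : ¬ u < 65) (h7 : ¬ u < 75) (hk : u < 85) : pvStep u = 8 := by
  unfold pvStep; rw [if_neg h0, if_neg h1, if_neg h2, if_neg h3, if_neg h4, if_neg h5, if_neg h6, if_neg h7, if_pos hk]

lemma pvStep_eq_9 (u : Int) (h0 : ¬ u < 5) (h1 : ¬ u < 15) (h2 : ¬ u < 25) (h3 : ¬ u < 35) (h4 : ¬ u < 45) (h5 : ¬ u < 55) (h6 : ¬ u < 65) (h7 : ¬ u < 75) (h8 : ¬ u < 85) (hk : u < 95) : pvStep u = 9 := by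
  unfold pvStep; rw [if_neg h0, if_neg h1, if_neg h2, if_neg h3, if_neg h4, if_neg h5, if_neg h6, if_neg h7, if_neg h8, if_pos hk]

lemma pvStep_eq_10 (u : Int) (h0 : ¬ u < 5) (h1 : ¬ u < 15) (h2 : ¬ u < 25) (h3 : ¬ u < 35) (h4 : ¬ u < 45) (h5 : ¬ u < 55) (h6 : ¬ u < 65) (h7 : ¬ u < 75) (h8 : ¬ u < 85) (h9 : ¬ u < 95) (hk : u < 125) : pvStep u = 10 := by
  unfold pvStep; rw [if_neg h0, if_neg h1, if_neg h2, if_neg h3, if_neg h4, if_neg h5, if_neg h6, if_neg h7, if_neg h8, if_neg h9, if_pos hk]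

lemma pvStep_eq_11 (u : Int) (h0 : ¬ u < 5) (h1 : ¬ u < 15) (h2 : ¬ u < 25) (h3 : ¬ u < 35) (h4 : ¬ u < 45) (h5 : ¬ u < 55) (h6 : ¬ u < 65) (h7 : ¬ u < 75) (h8 : ¬ u < 85) (h9 : ¬ u < 95) (h10 : ¬ u < 125) (hk : u < 160) : pvStep u = 11 := by
  unfold pvStep; rw [if_neg h0, if_neg h1, if_neg h2, if_neg h3, if_neg h4, if_neg h5, if_neg h6, if_neg h7, if_neg h8, if_neg h9, if_neg h10, if_pos hk]

lemma pvStep_eq_12 (u : Int) (h0 : ¬ u < 5) (h1 : ¬ u < 15) (h2 : ¬ u < 25) (h3 : ¬ u < 35) (h4 : ¬ u < 45) (h5 : ¬ u < 55) (h6 : ¬ u < 65) (h7 : ¬ u < 75) (h8 : ¬ u < 85) (h9 : ¬ u < 95) (h10 : ¬ u < 125) (h11 : ¬ u < 160) (hk : u < 200) : pvStep u = 12 := by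
  unfold pvStep; rw [if_neg h0, if_neg h1, if_neg h2, if_neg h3, if_neg h4, if_neg h5, if_neg h6, if_neg h7, if_neg h8, if_neg h9, if_neg h10, if_neg h11, if_pos hk]

lemma pvStep_eq_13 (u : Int) (h0 : ¬ u < 5) (h1 : ¬ u < 15) (h2 : ¬ u < 25) (h3 : ¬ u < 35) (h4 : ¬ u < 45) (h5 : ¬ u < 55) (h6 : ¬ u < 65) (h7 : ¬ u < 75) (h8 : ¬ u < 85) (h9 : ¬ u < 95) (h10 : ¬ u < 125) (h11 : ¬ u < 160) (h12 : ¬ u < 200) (hk : u < 250) : pvStep u = 13 := by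
  unfold pvStep; rw [if_neg h0, if_neg h1, if_neg h2, if_neg h3, if_neg h4, if_neg h5, if_neg h6, if_neg h7, if_neg h8, if_neg h9, if_neg h10, if_neg h11, if_neg h12, if_pos hk]

lemma pvStep_eq_14 (u : Int) (h0 : ¬ u < 5) (h1 : ¬ u < 15) (h2 : ¬ u < 25) (h3 : ¬ u < 35) (h4 : ¬ u < 45) (h5 : ¬ u < 55) (h6 : ¬ u < 65) (h7 : ¬ u < 75) (h8 : ¬ u < 85) (h9 : ¬ u < 95) (h10 : ¬ u < 125) (h11 : ¬ u < 160) (h12 : ¬ u < 200) (h13 : ¬ u < 250) (hk : u < 310) : pvStep u = 14 := by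
  unfold pvStep; rw [if_neg h0, if_neg h1, if_neg h2, if_neg h3, if_neg h4, if_neg h5, if_neg h6, if_neg h7, if_neg h8, if_neg h9, if_neg h10, if_neg h11, if_neg h12, if_neg h13, if_pos hk]

lemma pvStep_eq_15 (u : Int) (h0 : ¬ u < 5) (h1 : ¬ u < 15) (h2 : ¬ u < 25) (h3 : ¬ u < 35) (h4 : ¬ u < 45) (h5 : ¬ u < 55) (h6 : ¬ u < 65) (h7 : ¬ u < 75) (h8 : ¬ u < 85) (h9 : ¬ u < 95) (h10 : ¬ u < 125) (h11 : ¬ u < 160) (h12 : ¬ u < 200) (h13 : ¬ u < 250) (h14 : ¬ u < 310) (hk : u < 390) : pvStep u = 15 := by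
  unfold pvStep; rw [if_neg h0, if_neg h1, if_neg h2, if_neg h3, if_neg h4, if_neg h5, if_neg h6, if_neg h7, if_neg h8, if_neg h9, if_neg h10, if_neg h11, if_neg h12, if_neg h13, if_neg h14, if_pos hk]

lemma pvStep_eq_16 (u : Int) (h0 : ¬ u < 5) (h1 : ¬ u < 15) (h2 : ¬ u < 25) (h3 : ¬ u < 35) (h4 : ¬ u < 45) (h5 : ¬ u < 55) (h6 : ¬ u < 65) (h7 : ¬ u < 75) (h8 : ¬ u < 85) (h9 : ¬ u < 95) (h10 : ¬ u < 125) (h11 : ¬ u < 160) (h12 : ¬ u < 200) (h13 : ¬ u < 250) (h14 : ¬ u < 310) (h15 : ¬ u < 390) (hk : u < 480) : pvStep u = 16 := by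
  unfold pvStep; rw [if_neg h0, if_neg h1, if_neg h2, if_neg h3, if_neg h4, if_neg h5, if_neg h6, if_neg h7, if_neg h8, if_neg h9, if_neg h10, if_neg h11, if_neg h12, if_neg h13, if_neg h14, if_neg h15, if_pos hk]

lemma pvStep_eq_17 (u : Int) (h0 : ¬ u < 5) (h1 : ¬ u < 15) (h2 : ¬ u < 25) (h3 : ¬ u < 35) (h4 : ¬ u < 45) (h5 : ¬ u < 55) (h6 : ¬ u < 65) (h7 : ¬ u < 75) (h8 : ¬ u < 85) (h9 : ¬ u < 95) (h10 : ¬ u < 125) (h11 : ¬ u < 160) (h12 : ¬ u < 200) (h13 : ¬ u < 250) (h14 : ¬ u < 310) (h15 : ¬ u < 390) (h16 : ¬ u < 480) (hk : u < 590) : pvStep u = 17 := by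
  unfold pvStep; rw [if_neg h0, if_neg h1, if_neg h2, if_neg h3, if_neg h4, if_neg h5, if_neg h6, if_neg h7, if_neg h8, if_neg h9, if_neg h10, if_neg h11, if_neg h12, if_neg h13, if_neg h14, if_neg h15, if_neg h16, if_pos hk]

lemma pvStep_eq_18 (u : Int) (h0 : ¬ u < 5) (h1 : ¬ u < 15) (h2 : ¬ u < 25) (h3 : ¬ u < 35) (h4 : ¬ u < 45) (h5 : ¬ u < 55) (h6 : ¬ u < 65) (h7 : ¬ u < 75) (h8 : ¬ u < 85) (h9 : ¬ u < 95) (h10 : ¬ u < 125) (h11 : ¬ u < 160) (h12 : ¬ u < 200) (h13 : ¬ u < 250) (h14 : ¬ u < 310) (h15 : ¬ u < 390) (h16 : ¬ u < 480) (h17 : ¬ u < 590) (hk : u < 720) : pvStep u = 18 := by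
  unfold pvStep; rw [if_neg h0, if_neg h1, if_neg h2, if_neg h3, if_neg h4, if_neg h5, if_neg h6, if_neg h7, if_neg h8, if_neg h9, if_neg h10, if_neg h11, if_neg h12, if_neg h13, if_neg h14, if_neg h15, if_neg h16, if_neg h17, if_pos hk]

lemma pvStep_eq_19 (u : Int) (h0 : ¬ u < 5) (h1 : ¬ u < 15) (h2 : ¬ u < 25) (h3 : ¬ u < 35) (h4 : ¬ u < 45) (h5 : ¬ u < 55) (h6 : ¬ u < 65) (h7 : ¬ u < 75) (h8 : ¬ u < 85) (h9 : ¬ u < 95) (h10 : ¬ u < 125) (h11 : ¬ u < 160) (h12 : ¬ u < 200) (h13 : ¬ u < 250) (h14 : ¬ u < 310) (h15 : ¬ u < 390) (h16 : ¬ u < 480) (h17 : ¬ u < 590) (h18 : ¬ u < 720) (hk : u < 880) : pvStep u = 19 := by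
  unfold pvStep; rw [if_neg h0, if_neg h1, if_neg h2, if_neg h3, if_neg h4, if_neg h5, if_neg h6, if_neg h7, if_neg h8, if_neg h9, if_neg h10, if_neg h11, if_neg h12, if_neg h13, if_neg h14, if_neg h15, if_neg h16, if_neg h17, if_neg h18, if_pos hk]

lemma pvStep_eq_20 (u : Int) (h0 : ¬ u < 5) (h1 : ¬ u < 15) (h2 : ¬ u < 25) (h3 : ¬ u < 35) (h4 : ¬ u < 45) (h5 : ¬ u < 55) (h6 : ¬ u < 65) (h7 : ¬ u < 75) (h8 : ¬ u < 85) (h9 : ¬ u < 95) (h10 : ¬ u < 125) (h11 : ¬ u < 160) (h12 : ¬ u < 200) (h13 : ¬ u < 250) (h14 : ¬ u < 310) (h15 : ¬ u < 390) (h16 : ¬ u < 480) (h17 : ¬ u < 590) (h18 : ¬ u < 720) (h19 : ¬ u < 880) : pvStep u = 20 := by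
  unfold pvStep; rw [if_neg h0, if_neg h1, if_neg h2, if_neg h3, if_neg h4, if_neg h5, if_neg h6, if_neg h7, if_neg h8, if_neg h9, if_neg h10, if_neg h11, if_neg h12, if_neg h13, if_neg h14, if_neg h15, if_neg h16, if_neg h17, if_neg h18, if_neg h19]

set_option maxRecDepth 4000 in
set_option maxHeartbeats 1000000 in
lemma pvA_eq_step (u : Int) : get_minion_slots u = 5 + pvStep u := by
  unfold get_minion_slots pvThresholds
  simp only [pvLoopA]
  by_cases ha0 : u ≥ (5:Int)
  case neg =>
    rw [if_neg ha0]
    rw [pvStep_eq_0 u (by omega)] <;> omega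
  rw [if_pos ha0]
  by_cases ha1 : u ≥ (15:Int)
  case neg =>
    rw [if_neg ha1]
    rw [pvStep_eq_1 u (by omega) (by omega)] <;> omega
  rw [if_pos ha1]
  by_cases ha2 : u ≥ (25:Int)
  case neg =>
    rw [if_neg ha2]
    rw [pvStep_eq_2 u (by omega) (by omega) (by omega)] <;> omega
  rw [if_pos ha2]
  by_cases ha3 : u ≥ (35:Int)
  case neg =>
    rw [if_neg ha3]
    rw [pvStep_eq_3 u (by omega) (by omega) (by omega) (by omega)] <;> omega
  rw [if_pos ha3]
  by_cases ha4 : u ≥ (45:Int)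
  case neg =>
    rw [if_neg ha4]
    rw [pvStep_eq_4 u (by omega) (by omega) (by omega) (by omega) (by omega)] <;> omega
  rw [if_pos ha4]
  by_cases ha5 : u ≥ (55:Int)
  case neg =>
    rw [if_neg ha5]
    rw [pvStep_eq_5 u (by omega) (by omega) (by omega) (by omega) (by omega) (by omega)] <;> omega
  rw [if_pos ha5]
  by_cases ha6 : u ≥ (65:Int)
  case neg =>
    rw [if_neg ha6]
    rw [pvStep_eq_6 u (by omega) (by omega) (by omega) (by omega) (by omega) (by omega) (by omega)] <;> omega
  rw [if_pos ha6]
  by_cases ha7 : u ≥ (75:Int)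
  case neg =>
    rw [if_neg ha7]
    rw [pvStep_eq_7 u (by omega) (by omega) (by omega) (by omega) (by omega) (by omega) (by omega) (by omega)] <;> omega
  rw [if_pos ha7]
  by_cases ha8 : u ≥ (85:Int)
  case neg =>
    rw [if_neg ha8]
    rw [pvStep_eq_8 u (by omega) (by omega) (by omega) (by omega) (by omega) (by omega) (by omega) (by omega) (by omega)] <;> omega
  rw [if_pos ha8]
  by_cases ha9 : u ≥ (95:Int)
  case neg =>
    rw [if_neg ha9]
    rw [pvStep_eq_9 u (by omega) (by omega) (by omega) (by omega) (by omega) (by omega) (by omega) (by omega) (by omega) (by omega)] <;> omega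
  rw [if_pos ha9]
  by_cases ha10 : u ≥ (125:Int)
  case neg =>
    rw [if_neg ha10]
    rw [pvStep_eq_10 u (by omega) (by omega) (by omega) (by omega) (by omega) (by omega) (by omega) (by omega) (by omega) (by omega) (by omega)] <;> omega
  rw [if_pos ha10]
  by_cases ha11 : u ≥ (160:Int)
  case neg =>
    rw [if_neg ha11]
    rw [pvStep_eq_11 u (by omega) (by omega) (by omega) (by omega) (by omega) (by omega) (by omega) (by omega) (by omega) (by omega) (by omega) (by omega)] <;> omega
  rw [if_pos ha11]
  by_cases ha12 : u ≥ (200:Int)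
  case neg =>
    rw [if_neg ha12]
    rw [pvStep_eq_12 u (by omega) (by omega) (by omega) (by omega) (by omega) (by omega) (by omega) (by omega) (by omega) (by omega) (by omega) (by omega) (by omega)] <;> omega
  rw [if_pos ha12]
  by_cases ha13 : u ≥ (250:Int)
  case neg =>
    rw [if_neg ha13]
    rw [pvStep_eq_13 u (by omega) (by omega) (by omega) (by omega) (by omega) (by omega) (by omega) (by omega) (by omega) (by omega) (by omega) (by omega) (by omega) (by omega)] <;> omega
  rw [if_pos ha13]
  by_cases ha14 : u ≥ (310:Int)
  case neg =>
    rw [if_neg ha14]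
    rw [pvStep_eq_14 u (by omega) (by omega) (by omega) (by omega) (by omega) (by omega) (by omega) (by omega) (by omega) (by omega) (by omega) (by omega) (by omega) (by omega) (by omega)] <;> omega
  rw [if_pos ha14]
  by_cases ha15 : u ≥ (390:Int)
  case neg =>
    rw [if_neg ha15]
    rw [pvStep_eq_15 u (by omega) (by omega) (by omega) (by omega) (by omega) (by omega) (by omega) (by omega) (by omega) (by omega) (by omega) (by omega) (by omega) (by omega) (by omega) (by omega)] <;> omega
  rw [if_pos ha15]
  by_cases ha16 : u ≥ (480:Int)
  case neg =>
    rw [if_neg ha16]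
    rw [pvStep_eq_16 u (by omega) (by omega) (by omega) (by omega) (by omega) (by omega) (by omega) (by omega) (by omega) (by omega) (by omega) (by omega) (by omega) (by omega) (by omega) (by omega) (by omega)] <;> omega
  rw [if_pos ha16]
  by_cases ha17 : u ≥ (590:Int)
  case neg =>
    rw [if_neg ha17]
    rw [pvStep_eq_17 u (by omega) (by omega) (by omega) (by omega) (by omega) (by omega) (by omega) (by omega) (by omega) (by omega) (by omega) (by omega) (by omega) (by omega) (by omega) (by omega) (by omega) (by omega)] <;> omega
  rw [if_pos ha17]
  by_cases ha18 : u ≥ (720:Int)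
  case neg =>
    rw [if_neg ha18]
    rw [pvStep_eq_18 u (by omega) (by omega) (by omega) (by omega) (by omega) (by omega) (by omega) (by omega) (by omega) (by omega) (by omega) (by omega) (by omega) (by omega) (by omega) (by omega) (by omega) (by omega) (by omega)] <;> omega
  rw [if_pos ha18]
  by_cases ha19 : u ≥ (880:Int)
  case neg =>
    rw [if_neg ha19]
    rw [pvStep_eq_19 u (by omega) (by omega) (by omega) (by omega) (by omega) (by omega) (by omega) (by omega) (by omega) (by omega) (by omega) (by omega) (by omega) (by omega) (by omega) (by omega) (by omega) (by omega) (by omega) (by omega)] <;> omega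
  rw [if_pos ha19]
  rw [pvStep_eq_20 u (by omega) (by omega) (by omega) (by omega) (by omega) (by omega) (by omega) (by omega) (by omega) (by omega) (by omega) (by omega) (by omega) (by omega) (by omega) (by omega) (by omega) (by omega) (by omega) (by omega)] <;> omega

set_option maxRecDepth 4000 in
set_option maxHeartbeats 1000000 in
lemma pvB_eq_step (u : Int) : get_minion_slots_alt u = 5 + pvStep u := by
  unfold get_minion_slots_alt pvThresholds
  rw [pvBisectRight]; norm_num [List.getD]
  by_cases hb0 : u < (125:Int)
  case pos =>
    rw [if_pos hb0]
    rw [pvBisectRight]; norm_num [List.getD]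
    by_cases hb1 : u < (55:Int)
    case pos =>
      rw [if_pos hb1]
      rw [pvBisectRight]; norm_num [List.getD]
      by_cases hb2 : u < (25:Int)
      case pos =>
        rw [if_pos hb2]
        rw [pvBisectRight]; norm_num [List.getD]
        by_cases hb3 : u < (15:Int)
        case pos =>
          rw [if_pos hb3]
          rw [pvBisectRight]; norm_num [List.getD]
          by_cases hb4 : u < (5:Int)
          case pos =>
            rw [if_pos hb4]
            rw [pvBisectRight]; norm_num [List.getD]
            rw [pvStep_eq_0 u (by omega)] <;> omega
          rw [if_neg hb4]
          rw [pvBisectRight]; norm_num [List.getD]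
          rw [pvStep_eq_1 u (by omega) (by omega)] <;> omega
        rw [if_neg hb3]
        rw [pvBisectRight]; norm_num [List.getD]
        rw [pvStep_eq_2 u (by omega) (by omega) (by omega)] <;> omega
      rw [if_neg hb2]
      rw [pvBisectRight]; norm_num [List.getD]
      by_cases hb5 : u < (45:Int)
      case pos =>
        rw [if_pos hb5]
        rw [pvBisectRight]; norm_num [List.getD]
        by_cases hb6 : u < (35:Int)
        case pos =>
          rw [if_pos hb6]
          rw [pvBisectRight]; norm_num [List.getD]
          rw [pvStep_eq_3 u (by omega) (by omega) (by omega) (by omega)] <;> omega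
        rw [if_neg hb6]
        rw [pvBisectRight]; norm_num [List.getD]
        rw [pvStep_eq_4 u (by omega) (by omega) (by omega) (by omega) (by omega)] <;> omega
      rw [if_neg hb5]
      rw [pvBisectRight]; norm_num [List.getD]
      rw [pvStep_eq_5 u (by omega) (by omega) (by omega) (by omega) (by omega) (by omega)] <;> omega
    rw [if_neg hb1]
    rw [pvBisectRight]; norm_num [List.getD]
    by_cases hb7 : u < (85:Int)
    case pos =>
      rw [if_pos hb7]
      rw [pvBisectRight]; norm_num [List.getD]
      by_cases hb8 : u < (75:Int)
      case pos =>
        rw [if_pos hb8]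
        rw [pvBisectRight]; norm_num [List.getD]
        by_cases hb9 : u < (65:Int)
        case pos =>
          rw [if_pos hb9]
          rw [pvBisectRight]; norm_num [List.getD]
          rw [pvStep_eq_6 u (by omega) (by omega) (by omega) (by omega) (by omega) (by omega) (by omega)] <;> omega
        rw [if_neg hb9]
        rw [pvBisectRight]; norm_num [List.getD]
        rw [pvStep_eq_7 u (by omega) (by omega) (by omega) (by omega) (by omega) (by omega) (by omega) (by omega)] <;> omega
      rw [if_neg hb8]
      rw [pvBisectRight]; norm_num [List.getD]
      rw [pvStep_eq_8 u (by omega) (by omega) (by omega) (by omega) (by omega) (by omega) (by omega) (by omega) (by omega)] <;> omega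
    rw [if_neg hb7]
    rw [pvBisectRight]; norm_num [List.getD]
    by_cases hb10 : u < (95:Int)
    case pos =>
      rw [if_pos hb10]
      rw [pvBisectRight]; norm_num [List.getD]
      rw [pvStep_eq_9 u (by omega) (by omega) (by omega) (by omega) (by omega) (by omega) (by omega) (by omega) (by omega) (by omega)] <;> omega
    rw [if_neg hb10]
    rw [pvBisectRight]; norm_num [List.getD]
    rw [pvStep_eq_10 u (by omega) (by omega) (by omega) (by omega) (by omega) (by omega) (by omega) (by omega) (by omega) (by omega) (by omega)] <;> omega
  rw [if_neg hb0]
  rw [pvBisectRight]; norm_num [List.getD]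
  by_cases hb11 : u < (390:Int)
  case pos =>
    rw [if_pos hb11]
    rw [pvBisectRight]; norm_num [List.getD]
    by_cases hb12 : u < (250:Int)
    case pos =>
      rw [if_pos hb12]
      rw [pvBisectRight]; norm_num [List.getD]
      by_cases hb13 : u < (200:Int)
      case pos =>
        rw [if_pos hb13]
        rw [pvBisectRight]; norm_num [List.getD]
        by_cases hb14 : u < (160:Int)
        case pos =>
          rw [if_pos hb14]
          rw [pvBisectRight]; norm_num [List.getD]
          rw [pvStep_eq_11 u (by omega) (by omega) (by omega) (by omega) (by omega) (by omega) (by omega) (by omega) (by omega) (by omega) (by omega) (by omega)] <;> omega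
        rw [if_neg hb14]
        rw [pvBisectRight]; norm_num [List.getD]
        rw [pvStep_eq_12 u (by omega) (by omega) (by omega) (by omega) (by omega) (by omega) (by omega) (by omega) (by omega) (by omega) (by omega) (by omega) (by omega)] <;> omega
      rw [if_neg hb13]
      rw [pvBisectRight]; norm_num [List.getD]
      rw [pvStep_eq_13 u (by omega) (by omega) (by omega) (by omega) (by omega) (by omega) (by omega) (by omega) (by omega) (by omega) (by omega) (by omega) (by omega) (by omega)] <;> omega
    rw [if_neg hb12]
    rw [pvBisectRight]; norm_num [List.getD]
    by_cases hb15 : u < (310:Int)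
    case pos =>
      rw [if_pos hb15]
      rw [pvBisectRight]; norm_num [List.getD]
      rw [pvStep_eq_14 u (by omega) (by omega) (by omega) (by omega) (by omega) (by omega) (by omega) (by omega) (by omega) (by omega) (by omega) (by omega) (by omega) (by omega) (by omega)] <;> omega
    rw [if_neg hb15]
    rw [pvBisectRight]; norm_num [List.getD]
    rw [pvStep_eq_15 u (by omega) (by omega) (by omega) (by omega) (by omega) (by omega) (by omega) (by omega) (by omega) (by omega) (by omega) (by omega) (by omega) (by omega) (by omega) (by omega)] <;> omega
  rw [if_neg hb11]
  rw [pvBisectRight]; norm_num [List.getD]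
  by_cases hb16 : u < (720:Int)
  case pos =>
    rw [if_pos hb16]
    rw [pvBisectRight]; norm_num [List.getD]
    by_cases hb17 : u < (590:Int)
    case pos =>
      rw [if_pos hb17]
      rw [pvBisectRight]; norm_num [List.getD]
      by_cases hb18 : u < (480:Int)
      case pos =>
        rw [if_pos hb18]
        rw [pvBisectRight]; norm_num [List.getD]
        rw [pvStep_eq_16 u (by omega) (by omega) (by omega) (by omega) (by omega) (by omega) (by omega) (by omega) (by omega) (by omega) (by omega) (by omega) (by omega) (by omega) (by omega) (by omega) (by omega)] <;> omega
      rw [if_neg hb18]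
      rw [pvBisectRight]; norm_num [List.getD]
      rw [pvStep_eq_17 u (by omega) (by omega) (by omega) (by omega) (by omega) (by omega) (by omega) (by omega) (by omega) (by omega) (by omega) (by omega) (by omega) (by omega) (by omega) (by omega) (by omega) (by omega)] <;> omega
    rw [if_neg hb17]
    rw [pvBisectRight]; norm_num [List.getD]
    rw [pvStep_eq_18 u (by omega) (by omega) (by omega) (by omega) (by omega) (by omega) (by omega) (by omega) (by omega) (by omega) (by omega) (by omega) (by omega) (by omega) (by omega) (by omega) (by omega) (by omega) (by omega)] <;> omega
  rw [if_neg hb16]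
  rw [pvBisectRight]; norm_num [List.getD]
  by_cases hb19 : u < (880:Int)
  case pos =>
    rw [if_pos hb19]
    rw [pvBisectRight]; norm_num [List.getD]
    rw [pvStep_eq_19 u (by omega) (by omega) (by omega) (by omega) (by omega) (by omega) (by omega) (by omega) (by omega) (by omega) (by omega) (by omega) (by omega) (by omega) (by omega) (by omega) (by omega) (by omega) (by omega) (by omega)] <;> omega
  rw [if_neg hb19]
  rw [pvBisectRight]; norm_num [List.getD]
  rw [pvStep_eq_20 u (by omega) (by omega) (by omega) (by omega) (by omega) (by omega) (by omega) (by omega) (by omega) (by omega) (by omega) (by omega) (by omega) (by omega) (by omega) (by omega) (by omega) (by omega) (by omega) (by omega)] <;> omega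

-- ===== VERDICT (by name: the statement is the Claim_ definition above) =====
theorem get_minion_slots_spec : Claim_equal_get_minion_slots := by
  intro u _
  unfold Spec_get_minion_slots
  rw [pvA_eq_step, pvB_eq_step]
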